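-- pv_equiv track=rewrite | github.com/rohujin97/Algorithm_Python | test/test1.py | solution
-- ===== SOURCE A (Python) =====
-- def solution(A):
--     list1 = []
--     list2 = []
--
--     for i in A:
--         if i % 2 == 0:
--             list1.append(i)
--         else:
--             list2.append(i)
--
--
--     max1 = 0 if not list1 else max(list1)
--     max2 = 0 if not list2 else max(list2)
--     return(max1 + max2)
-- ===== SOURCE B (Python) =====
-- def solution(A):
--     max_even = None
--     max_odd = None
--     for i in A:
--         if i % 2 == 0:
--             max_even = i if max_even is None else max(max_even, i)
--         else:
--             max_odd = i if max_odd is None else max(max_odd, i)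
--     return (0 if max_even is None else max_even) + (0 if max_odd is None else max_odd)
-- ===== Notes on version B (the rewrite author's own statement) =====
-- stated objective: simpler
-- what changed: Instead of materialising two parity lists and calling max on each afterwards, B keeps two Optional running maxima in a single pass and sums them (None -> 0) at the end, using O(1) extra space.
import Mathlib
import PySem

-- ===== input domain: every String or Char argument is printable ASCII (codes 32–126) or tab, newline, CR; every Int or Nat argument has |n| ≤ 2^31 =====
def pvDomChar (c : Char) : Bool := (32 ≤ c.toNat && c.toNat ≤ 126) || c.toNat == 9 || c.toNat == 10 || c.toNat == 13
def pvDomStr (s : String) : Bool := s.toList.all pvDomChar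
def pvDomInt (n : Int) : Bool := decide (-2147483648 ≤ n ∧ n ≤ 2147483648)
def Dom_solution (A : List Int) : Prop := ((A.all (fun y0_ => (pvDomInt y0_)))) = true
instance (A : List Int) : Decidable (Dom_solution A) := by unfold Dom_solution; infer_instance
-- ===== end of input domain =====

-- B replaces A's two materialised parity lists (+ max afterwards) with two Optional running maxima in one pass (simpler, O(1) extra space).

-- ===== PORT A =====
def solution (A : List Int) : Int :=
  let p := A.foldl
    (fun (s : List Int × List Int) i =>
      if PySem.Int.mod i 2 = 0 then (s.1 ++ [i], s.2) else (s.1, s.2 ++ [i]))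
    ([], [])
  let max1 : Int := if p.1 = [] then 0 else ((PySem.List.max? p.1 (fun y => y)).getD 0)
  let max2 : Int := if p.2 = [] then 0 else ((PySem.List.max? p.2 (fun y => y)).getD 0)
  max1 + max2

-- ===== PORT B =====
def solution_alt (A : List Int) : Int :=
  let s := A.foldl
    (fun (s : Option Int × Option Int) i =>
      if PySem.Int.mod i 2 = 0 then
        (some (match s.1 with | none => i | some m => max m i), s.2)
      else
        (s.1, some (match s.2 with | none => i | some m => max m i)))
    (none, none)
  s.1.getD 0 + s.2.getD 0

-- ===== PRECONDITION & SPEC =====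
def Spec_solution (A : List Int) (out : Int) : Prop := out = solution_alt A
instance (A : List Int) (out : Int) : Decidable (Spec_solution A out) := by unfold Spec_solution; infer_instance

-- ===== CLAIM (what is proved, stated in full; the proofs are below) =====
def Claim_equal_solution : Prop := ∀ (A : List Int), Dom_solution A → Spec_solution A (solution A)

-- ===== LEMMAS AND PROOFS =====

-- max? (l ++ [i]) folds the new element into max? l
theorem max?_id_snoc (l : List Int) (i : Int) :
    PySem.List.max? (l ++ [i]) (fun y => y) =
      some (match PySem.List.max? l (fun y => y) with | none => i | some m => max m i) := by
  cases l with
  | nil => simp [PySem.List.max?_id_cons, show PySem.List.max? ([] : List Int) (fun y => y) = none from rfl]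
  | cons x t =>
    rw [List.cons_append, PySem.List.max?_id_cons, PySem.List.max?_id_cons]
    simp [List.foldl_append]

-- loop invariant: B's optional accumulators are the max? of A's lists
theorem loop_inv (A : List Int) :
    ∀ (l1 l2 : List Int),
      (A.foldl
        (fun (s : Option Int × Option Int) i =>
          if PySem.Int.mod i 2 = 0 then
            (some (match s.1 with | none => i | some m => max m i), s.2)
          else
            (s.1, some (match s.2 with | none => i | some m => max m i)))
        (PySem.List.max? l1 (fun y => y), PySem.List.max? l2 (fun y => y)))
      = (PySem.List.max?
            (A.foldl (fun (s : List Int × List Int) i =>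
              if PySem.Int.mod i 2 = 0 then (s.1 ++ [i], s.2) else (s.1, s.2 ++ [i])) (l1, l2)).1
            (fun y => y),
         PySem.List.max?
            (A.foldl (fun (s : List Int × List Int) i =>
              if PySem.Int.mod i 2 = 0 then (s.1 ++ [i], s.2) else (s.1, s.2 ++ [i])) (l1, l2)).2
            (fun y => y)) := by
  induction A with
  | nil => intro l1 l2; simp
  | cons i t ih =>
    intro l1 l2
    by_cases h : PySem.Int.mod i 2 = 0
    · simp only [List.foldl_cons, h, if_pos]
      rw [← max?_id_snoc l1 i]
      exact ih (l1 ++ [i]) l2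
    · simp only [List.foldl_cons, h, ite_false]
      rw [← max?_id_snoc l2 i]
      exact ih l1 (l2 ++ [i])

theorem getD_max? (l : List Int) :
    (if l = [] then (0 : Int) else (PySem.List.max? l (fun y => y)).getD 0)
      = (PySem.List.max? l (fun y => y)).getD 0 := by
  cases l with
  | nil => simp [PySem.List.max?]
  | cons x t => simp

-- ===== VERDICT (by name: the statement is the Claim_ definition above) =====
theorem solution_spec : Claim_equal_solution := by
  intro A _
  unfold Spec_solution solution solution_alt
  dsimp only
  have h := loop_inv A [] []
  rw [show PySem.List.max? ([] : List Int) (fun y => y) = none from rfl] at h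
  rw [h, getD_max?, getD_max?]
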